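-- pv_equiv track=rewrite | github.com/Quidam2k/thevisiblewords-ai-art-store | printify-automation/detailed_tag_analysis.py | identify_target_audience
-- ===== SOURCE A (Python) =====
-- def identify_target_audience(tags: list) -> list:
--     """Identify target audience based on tags"""
--     audiences = []
--
--     if any('fantasy' in tag or 'gaming' in tag for tag in tags):
--         audiences.append("Gamers and Fantasy Fans")
--
--     if any('nature' in tag or 'landscape' in tag for tag in tags):
--         audiences.append("Nature Lovers")
--
--     if any('abstract' in tag or 'modern' in tag for tag in tags):
--         audiences.append("Modern Art Enthusiasts")
--
--     if any('sci-fi' in tag or 'futuristic' in tag for tag in tags):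
--         audiences.append("Sci-Fi Fans")
--
--     return audiences if audiences else ["General Art Lovers"]
-- ===== SOURCE B (Python) =====
-- KEYWORDS = [
--     ("fantasy", "gaming"),
--     ("nature", "landscape"),
--     ("abstract", "modern"),
--     ("sci-fi", "futuristic"),
-- ]
--
-- LABELS = [
--     "Gamers and Fantasy Fans",
--     "Nature Lovers",
--     "Modern Art Enthusiasts",
--     "Sci-Fi Fans",
-- ]
--
-- # Precomputed answer for every possible bitmask; mask 0 is the fallback.
-- ANSWERS = [
--     [LABELS[i] for i in range(4) if (mask >> i) & 1] or ["General Art Lovers"]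
--     for mask in range(16)
-- ]
--
--
-- def identify_target_audience(tags: list) -> list:
--     """One pass building a category bitmask, then a single table lookup."""
--     mask = 0
--     for tag in tags:
--         for i, (k1, k2) in enumerate(KEYWORDS):
--             if k1 in tag or k2 in tag:
--                 mask |= 1 << i
--     return ANSWERS[mask]
-- ===== Notes on version B (the rewrite author's own statement) =====
-- stated objective: alternative
-- what changed: A runs four separate any() scans and appends labels with an empty-list fallback check; B makes one pass over the tags accumulating a 4-bit category bitmask and returns the answer by a single lookup in a precomputed 16-entry table that has the fallback baked in as entry 0.
import Mathlib
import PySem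

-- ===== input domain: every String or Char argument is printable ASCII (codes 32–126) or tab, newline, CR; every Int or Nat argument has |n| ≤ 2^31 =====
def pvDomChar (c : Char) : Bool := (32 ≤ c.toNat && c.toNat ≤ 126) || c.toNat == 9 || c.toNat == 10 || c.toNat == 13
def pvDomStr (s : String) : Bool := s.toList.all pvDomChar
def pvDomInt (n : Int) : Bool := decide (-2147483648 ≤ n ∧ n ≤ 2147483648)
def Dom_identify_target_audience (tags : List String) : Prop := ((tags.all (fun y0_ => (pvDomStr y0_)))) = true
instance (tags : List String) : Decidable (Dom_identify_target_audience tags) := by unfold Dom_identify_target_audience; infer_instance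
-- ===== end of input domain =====

-- B replaces A's four any-scans and list building by one pass accumulating a 4-bit category
-- bitmask and a single lookup in a precomputed 16-entry answer table (fallback is entry 0);
-- objective: alternative decomposition, same cost.

-- ===== PORT A =====
-- Literal port of A: four `any` scans over tags, appending each label in turn.
def identify_target_audience (tags : List String) : List String :=
  let audiences : List String := []
  let audiences := if tags.any (fun tag => PySem.Str.isIn "fantasy" tag || PySem.Str.isIn "gaming" tag)
    then audiences ++ ["Gamers and Fantasy Fans"] else audiences
  let audiences := if tags.any (fun tag => PySem.Str.isIn "nature" tag || PySem.Str.isIn "landscape" tag)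
    then audiences ++ ["Nature Lovers"] else audiences
  let audiences := if tags.any (fun tag => PySem.Str.isIn "abstract" tag || PySem.Str.isIn "modern" tag)
    then audiences ++ ["Modern Art Enthusiasts"] else audiences
  let audiences := if tags.any (fun tag => PySem.Str.isIn "sci-fi" tag || PySem.Str.isIn "futuristic" tag)
    then audiences ++ ["Sci-Fi Fans"] else audiences
  if audiences = [] then ["General Art Lovers"] else audiences

-- ===== PORT B =====
def pvKeywords : List (String × String) :=
  [("fantasy", "gaming"), ("nature", "landscape"), ("abstract", "modern"), ("sci-fi", "futuristic")]

def pvLabels : List String :=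
  ["Gamers and Fantasy Fans", "Nature Lovers", "Modern Art Enthusiasts", "Sci-Fi Fans"]

-- precomputed answer for every possible bitmask; mask 0 is the fallback
def pvAnswers : List (List String) :=
  (List.range 16).map (fun mask =>
    let r := ((List.range 4).filter (fun i => (mask >>> i) &&& 1 = 1)).map (fun i => pvLabels.getD i "")
    if r = [] then ["General Art Lovers"] else r)

-- body of B's inner loop: fold the keyword table, or-ing the matched bits into the mask
def pvStepTag (mask : Nat) (tag : String) : Nat :=
  pvKeywords.zipIdx.foldl (fun m p =>
    if PySem.Str.isIn p.1.1 tag || PySem.Str.isIn p.1.2 tag then m ||| (1 <<< p.2) else m) mask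

def identify_target_audience_alt (tags : List String) : List String :=
  let mask := tags.foldl pvStepTag 0
  pvAnswers.getD mask []

-- ===== PRECONDITION & SPEC =====
def Spec_identify_target_audience (tags : List String) (out : List String) : Prop := out = identify_target_audience_alt tags
instance (tags : List String) (out : List String) : Decidable (Spec_identify_target_audience tags out) := by unfold Spec_identify_target_audience; infer_instance

-- ===== CLAIM (what is proved, stated in full; the proofs are below) =====
def Claim_equal_identify_target_audience : Prop := ∀ (tags : List String), Dom_identify_target_audience tags → Spec_identify_target_audience tags (identify_target_audience tags)

-- ===== LEMMAS AND PROOFS =====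

-- the bits contributed by one tag
def pvBits (tag : String) : Nat :=
  (if PySem.Str.isIn "fantasy" tag || PySem.Str.isIn "gaming" tag then 1 else 0) |||
  (if PySem.Str.isIn "nature" tag || PySem.Str.isIn "landscape" tag then 2 else 0) |||
  (if PySem.Str.isIn "abstract" tag || PySem.Str.isIn "modern" tag then 4 else 0) |||
  (if PySem.Str.isIn "sci-fi" tag || PySem.Str.isIn "futuristic" tag then 8 else 0)

theorem pvStepTag_eq (m : Nat) (t : String) : pvStepTag m t = m ||| pvBits t := by
  unfold pvStepTag pvBits
  simp only [pvKeywords, List.zipIdx, List.foldl]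
  cases hb1 : (PySem.Str.isIn "fantasy" t || PySem.Str.isIn "gaming" t) <;>
  cases hb2 : (PySem.Str.isIn "nature" t || PySem.Str.isIn "landscape" t) <;>
  cases hb3 : (PySem.Str.isIn "abstract" t || PySem.Str.isIn "modern" t) <;>
  cases hb4 : (PySem.Str.isIn "sci-fi" t || PySem.Str.isIn "futuristic" t) <;>
    simp [Nat.or_assoc]

-- combining one tag's bits with the rest of the list's bits, category by category
theorem pvCombine (m : Nat) (b1 b2 b3 b4 g1 g2 g3 g4 : Bool) :
    (m ||| ((((if b1 then 1 else 0) ||| (if b2 then 2 else 0)) ||| (if b3 then 4 else 0)) |||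
        (if b4 then 8 else 0))) |||
      ((((if g1 then 1 else 0) ||| (if g2 then 2 else 0)) ||| (if g3 then 4 else 0)) |||
        (if g4 then 8 else 0)) =
    m ||| ((((if b1 || g1 then 1 else 0) ||| (if b2 || g2 then 2 else 0)) |||
        (if b3 || g3 then 4 else 0)) ||| (if b4 || g4 then 8 else 0)) := by
  cases b1 <;> cases b2 <;> cases b3 <;> cases b4 <;>
  cases g1 <;> cases g2 <;> cases g3 <;> cases g4 <;> simp [Nat.or_assoc]

-- the fold's mask is m or-ed with the four `any` scans' bits
theorem pvFold_mask (tags : List String) (m : Nat) :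
    tags.foldl pvStepTag m = m |||
      ((if tags.any (fun tag => PySem.Str.isIn "fantasy" tag || PySem.Str.isIn "gaming" tag) then 1 else 0) |||
       (if tags.any (fun tag => PySem.Str.isIn "nature" tag || PySem.Str.isIn "landscape" tag) then 2 else 0) |||
       (if tags.any (fun tag => PySem.Str.isIn "abstract" tag || PySem.Str.isIn "modern" tag) then 4 else 0) |||
       (if tags.any (fun tag => PySem.Str.isIn "sci-fi" tag || PySem.Str.isIn "futuristic" tag) then 8 else 0)) := by
  induction tags generalizing m with
  | nil => simp
  | cons t ts ih =>
    simp only [List.foldl_cons, List.any_cons, pvStepTag_eq, ih]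
    unfold pvBits
    exact pvCombine m _ _ _ _ _ _ _ _

-- ===== VERDICT (by name: the statement is the Claim_ definition above) =====
theorem identify_target_audience_spec : Claim_equal_identify_target_audience := by
  intro tags _
  unfold Spec_identify_target_audience identify_target_audience identify_target_audience_alt
  rw [pvFold_mask]
  cases hg1 : (tags.any (fun tag => PySem.Str.isIn "fantasy" tag || PySem.Str.isIn "gaming" tag)) <;>
  cases hg2 : (tags.any (fun tag => PySem.Str.isIn "nature" tag || PySem.Str.isIn "landscape" tag)) <;>
  cases hg3 : (tags.any (fun tag => PySem.Str.isIn "abstract" tag || PySem.Str.isIn "modern" tag)) <;>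
  cases hg4 : (tags.any (fun tag => PySem.Str.isIn "sci-fi" tag || PySem.Str.isIn "futuristic" tag)) <;>
    decide
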